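-- pv_equiv track=rewrite | github.com/AbhijitPisal1/robotframework-python-projects | python-learning/02_coding-exercises/remove_duplicates_variations.py | get_duplicates_from_number
-- ===== SOURCE A (Python) =====
-- def get_duplicates_from_number(num):
--     digits = list(str(num))
--     seen = set()
--     duplicates = []
--     for d in digits:
--         if d in seen and d not in duplicates:
--             duplicates.append(d)
--         else:
--             seen.add(d)
--     return duplicates
-- ===== SOURCE B (Python) =====
-- def get_duplicates_from_number(num):
--     # Staged approach: dedup the characters of str(num), keep those occurring
--     # more than once, then sort them by the position of their second occurrence
--     # (which is exactly the order A emits them in).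
--     s = str(num)
--     dups = [c for c in dict.fromkeys(s) if s.count(c) > 1]
--     dups.sort(key=lambda c: s.index(c, s.index(c) + 1))
--     return dups
-- ===== Notes on version B (the rewrite author's own statement) =====
-- stated objective: alternative
-- what changed: Replaces A's single online pass with a seen-set and an emit-list by a staged pipeline: dedup the characters of str(num), filter those occurring more than once, then sort them by the index of their second occurrence, which is exactly A's emission order.
import Mathlib
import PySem

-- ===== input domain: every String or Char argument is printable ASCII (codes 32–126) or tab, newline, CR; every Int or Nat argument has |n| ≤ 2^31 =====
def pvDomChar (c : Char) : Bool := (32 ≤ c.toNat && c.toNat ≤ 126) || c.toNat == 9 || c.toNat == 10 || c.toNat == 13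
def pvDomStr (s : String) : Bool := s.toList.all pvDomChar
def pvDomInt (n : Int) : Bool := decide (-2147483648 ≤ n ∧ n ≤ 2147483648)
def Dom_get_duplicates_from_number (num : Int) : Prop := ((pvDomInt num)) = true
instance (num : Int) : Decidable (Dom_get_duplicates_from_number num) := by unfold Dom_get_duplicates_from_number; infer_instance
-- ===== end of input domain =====

-- B replaces A's online seen-set loop by a staged pipeline: dedup the characters,
-- filter those occurring more than once, and sort them by the position of their
-- second occurrence (objective: alternative algorithm, same ordering).

-- ===== PORT A =====
-- Python's 1-char strings (elements of list(str(num))) are represented as Char and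
-- converted to String on return; the comparisons involved are exact.
def get_duplicates_from_number (num : Int) : List String :=
  let digits := (PySem.Int.toStr num).toList
  let res := digits.foldl
    (fun (st : PySem.Set Char × List Char) d =>
      if d ∈ st.1 ∧ d ∉ st.2 then (st.1, st.2 ++ [d])
      else (PySem.Set.add st.1 d, st.2))
    (PySem.Set.empty, [])
  res.2.map (fun c => String.mk [c])

-- ===== PORT B =====
-- hand port of the sort key 'lambda c: s.index(c, s.index(c) + 1)': str.index(c)
-- is idxOf, and str.index(c, start) = start + idxOf of c in the suffix s[start:];
-- exact here because every c that B sorts occurs at least twice in s, so both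
-- searches succeed (no ValueError).
def pySecondIndex (s : List Char) (c : Char) : Nat :=
  (s.idxOf c + 1) + (s.drop (s.idxOf c + 1)).idxOf c

def get_duplicates_from_number_alt (num : Int) : List String :=
  let s := (PySem.Int.toStr num).toList
  let dups := (PySem.List.dedup s).filter (fun c => decide (1 < s.count c))
  (PySem.List.sorted dups (fun c => pySecondIndex s c) false).map (fun c => String.mk [c])

-- ===== PRECONDITION & SPEC =====
def Spec_get_duplicates_from_number (num : Int) (out : List String) : Prop := out = get_duplicates_from_number_alt num
instance (num : Int) (out : List String) : Decidable (Spec_get_duplicates_from_number num out) := by unfold Spec_get_duplicates_from_number; infer_instance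

-- ===== CLAIM (what is proved, stated in full; the proofs are below) =====
def Claim_equal_get_duplicates_from_number : Prop := ∀ (num : Int), Dom_get_duplicates_from_number num → Spec_get_duplicates_from_number num (get_duplicates_from_number num)

-- ===== LEMMAS AND PROOFS =====

-- A emits each character exactly at its second occurrence: this list is the
-- characterisation of A's accumulated 'duplicates'.
def secondOcc (l : List Char) : List Char :=
  (PySem.List.enumerate l).filterMap
    (fun ic => if (l.take ic.1.toNat).count ic.2 = 1 then some ic.2 else none)

theorem secondOcc_nil : secondOcc [] = [] := rfl

theorem secondOcc_append_singleton (p : List Char) (d : Char) :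
    secondOcc (p ++ [d]) = secondOcc p ++ (if p.count d = 1 then [d] else []) := by
  unfold secondOcc
  rw [PySem.List.enumerate_append, List.filterMap_append]
  congr 1
  · apply List.filterMap_congr
    intro ic hic
    rcases (PySem.List.mem_enumerate_iff _ _ _).1 hic with ⟨k, hk, rfl⟩
    simp only [Int.toNat_natCast, Int.zero_add]
    rw [List.take_append_of_le_length (by omega)]
  · have ht : List.take ((0 : Int) + (p.length : Int)).toNat (p ++ [d]) = p := by simp
    simp only [PySem.List.enumerate, List.filterMap_cons, List.filterMap_nil]
    rw [ht]
    split_ifs <;> rfl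

theorem mem_secondOcc (p : List Char) (c : Char) : c ∈ secondOcc p ↔ 2 ≤ p.count c := by
  induction p using List.reverseRecOn with
  | nil => simp [secondOcc_nil]
  | append_singleton p d ih =>
    rw [secondOcc_append_singleton, List.mem_append, ih, List.count_append]
    by_cases hcd : c = d
    · subst hcd
      have hone : List.count c [c] = 1 := by simp
      rw [hone]
      split_ifs with h1
      · simp [h1]
      · simp only [List.not_mem_nil, or_false]
        omega
    · have hzero : List.count c [d] = 0 := by
        simp [List.count_singleton]
        exact fun h => hcd h.symm
      rw [hzero]
      split_ifs with h1
      · simp only [List.mem_singleton, hcd, or_false]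
        omega
      · simp only [List.not_mem_nil, or_false]
        omega

theorem nodup_secondOcc (l : List Char) : (secondOcc l).Nodup := by
  induction l using List.reverseRecOn with
  | nil => simp [secondOcc_nil]
  | append_singleton p d ih =>
    rw [secondOcc_append_singleton]
    split_ifs with h1
    · refine List.Nodup.append ih (by simp) ?_
      intro a ha hb
      have := (mem_secondOcc p a).1 ha
      simp at hb
      subst hb
      omega
    · simpa using ih

theorem ofList_append_singleton (p : List Char) (d : Char) :
    PySem.Set.ofList (p ++ [d]) = PySem.Set.add (PySem.Set.ofList p) d := by
  rw [PySem.Set.ofList_eq_foldl, PySem.Set.ofList_eq_foldl, List.foldl_append]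
  rfl

theorem add_mem_self (s : PySem.Set Char) (d : Char) (h : d ∈ s) :
    PySem.Set.add s d = s := by
  simp [PySem.Set.add, PySem.Set.contains, h]

theorem foldl_inv (l p : List Char) :
    l.foldl
      (fun (st : PySem.Set Char × List Char) d =>
        if d ∈ st.1 ∧ d ∉ st.2 then (st.1, st.2 ++ [d])
        else (PySem.Set.add st.1 d, st.2))
      (PySem.Set.ofList p, secondOcc p)
    = (PySem.Set.ofList (p ++ l), secondOcc (p ++ l)) := by
  induction l generalizing p with
  | nil => simp
  | cons d l ih =>
    rw [List.foldl_cons]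
    have hstep :
        (if d ∈ PySem.Set.ofList p ∧ d ∉ secondOcc p
          then (PySem.Set.ofList p, secondOcc p ++ [d])
          else (PySem.Set.add (PySem.Set.ofList p) d, secondOcc p))
        = (PySem.Set.ofList (p ++ [d]), secondOcc (p ++ [d])) := by
      rw [secondOcc_append_singleton, ofList_append_singleton]
      by_cases hc : d ∈ PySem.Set.ofList p ∧ d ∉ secondOcc p
      · have hmem : d ∈ p := (PySem.Set.mem_ofList _ _).1 hc.1
        have h1 : 1 ≤ p.count d := List.one_le_count_iff.2 hmem
        have h2 : ¬ 2 ≤ p.count d := fun h => hc.2 ((mem_secondOcc p d).2 h)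
        have hcnt : p.count d = 1 := by omega
        rw [if_pos hc, if_pos hcnt, add_mem_self _ _ ((PySem.Set.mem_ofList _ _).2 hmem)]
      · have hcnt : p.count d ≠ 1 := by
          intro h1
          exact hc ⟨(PySem.Set.mem_ofList _ _).2 (List.one_le_count_iff.1 (by omega)),
            fun hm => by have := (mem_secondOcc p d).1 hm; omega⟩
        rw [if_neg hc, if_neg hcnt, List.append_nil]
    rw [hstep, ih (p ++ [d]), List.append_assoc]
    rfl

-- pySecondIndex really is the index of the second occurrence: if s[k] = c and c
-- occurs exactly once before position k, then pySecondIndex s c = k.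
theorem pySecondIndex_emit (s : List Char) (k : Nat) (c : Char) (hk : k < s.length)
    (hck : s[k] = c) (h1 : (s.take k).count c = 1) : pySecondIndex s c = k := by
  have hmemtake : c ∈ s.take k := List.one_le_count_iff.1 (by omega)
  have hsplit : s = s.take k ++ s.drop k := (List.take_append_drop k s).symm
  have hlen : (s.take k).length = k := by simp [List.length_take]; omega
  have hj : s.idxOf c = (s.take k).idxOf c := by
    conv_lhs => rw [hsplit]
    rw [List.idxOf_append_of_mem hmemtake]
  have hjlt : (s.take k).idxOf c < k := by
    have := List.idxOf_lt_length_of_mem hmemtake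
    omega
  have hgetj : (s.take k)[(s.take k).idxOf c]'(by omega) = c :=
    List.getElem_idxOf (by omega)
  -- c does not occur in s.take k strictly after its first occurrence there
  have hnotmem : c ∉ (s.take k).drop ((s.take k).idxOf c + 1) := by
    intro hmem
    have hdecomp : s.take k
        = (s.take k).take ((s.take k).idxOf c + 1)
          ++ (s.take k).drop ((s.take k).idxOf c + 1) :=
      (List.take_append_drop _ _).symm
    have hb : (s.take k).idxOf c
        < ((s.take k).take ((s.take k).idxOf c + 1)).length := by
      simp [List.length_take]
      omega
    have hmem1 : c ∈ (s.take k).take ((s.take k).idxOf c + 1) :=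
      List.mem_iff_getElem.2 ⟨(s.take k).idxOf c, hb, by rw [List.getElem_take]; exact hgetj⟩
    have h1' := h1
    rw [hdecomp, List.count_append] at h1'
    have c1 : 1 ≤ List.count c ((s.take k).take ((s.take k).idxOf c + 1)) :=
      List.one_le_count_iff.2 hmem1
    have c2 : 1 ≤ List.count c ((s.take k).drop ((s.take k).idxOf c + 1)) :=
      List.one_le_count_iff.2 hmem
    omega
  -- the suffix after the first occurrence: the gap (no c), then c at position k
  have hdropk : s.drop k = c :: s.drop (k + 1) := by
    rw [List.drop_eq_getElem_cons hk, hck]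
  have htail : ∀ j : Nat, j + 1 ≤ k →
      s.drop (j + 1) = (s.take k).drop (j + 1) ++ s.drop k := by
    intro j hjk1
    conv_lhs => rw [hsplit]
    rw [List.drop_append_of_le_length (by omega)]
  have hgaplen : ((s.take k).drop ((s.take k).idxOf c + 1)).length
      = k - ((s.take k).idxOf c + 1) := by
    simp [List.length_drop]
    omega
  have hidx2 : (s.drop ((s.take k).idxOf c + 1)).idxOf c
      = k - ((s.take k).idxOf c + 1) := by
    rw [htail _ (by omega), List.idxOf_append_of_notMem hnotmem, hdropk, List.idxOf_cons_self]
    omega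
  unfold pySecondIndex
  rw [hj, hidx2]
  omega

theorem pairwise_secondOcc (s : List Char) :
    (secondOcc s).Pairwise (fun a b => pySecondIndex s a < pySecondIndex s b) := by
  unfold secondOcc
  have base := PySem.List.pairwise_lt_enumerate (xs := s) (s := 0)
  have h2 : (PySem.List.enumerate s).Pairwise
      (fun a b => ∀ c, (if (s.take a.1.toNat).count a.2 = 1 then some a.2 else none) = some c →
        ∀ d, (if (s.take b.1.toNat).count b.2 = 1 then some b.2 else none) = some d →
          pySecondIndex s c < pySecondIndex s d) := by
    refine base.imp_of_mem ?_
    intro a b ha hb hlt c hc d hd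
    rcases (PySem.List.mem_enumerate_iff _ _ _).1 ha with ⟨k, hk, rfl⟩
    rcases (PySem.List.mem_enumerate_iff _ _ _).1 hb with ⟨m, hm, rfl⟩
    simp only [Int.zero_add, Int.toNat_natCast] at hc hd hlt
    split_ifs at hc hd with hck hdm
    · cases hc; cases hd
      rw [pySecondIndex_emit s k _ hk rfl hck, pySecondIndex_emit s m _ hm rfl hdm]
      exact_mod_cast hlt
  exact List.Pairwise.filterMap _ (fun a b h c hc d hd => h c hc d hd) h2

theorem perm_secondOcc (s : List Char) :
    (secondOcc s).Perm ((PySem.List.dedup s).filter (fun c => decide (1 < s.count c))) := by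
  refine (List.perm_ext_iff_of_nodup (nodup_secondOcc s)
    ((PySem.List.nodup_dedup s).filter _)).2 ?_
  intro a
  rw [mem_secondOcc, List.mem_filter, PySem.List.mem_dedup]
  constructor
  · intro h
    exact ⟨List.one_le_count_iff.1 (by omega), by simpa using (by omega : 1 < s.count a)⟩
  · intro ⟨_, h⟩
    have : 1 < s.count a := by simpa using h
    omega

theorem sorted_eq_secondOcc (s : List Char) :
    PySem.List.sorted ((PySem.List.dedup s).filter (fun c => decide (1 < s.count c)))
      (fun c => pySecondIndex s c) false = secondOcc s :=
  PySem.List.sorted_eq_of_perm_of_pairwise_lt _ _ _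
    (perm_secondOcc s) (pairwise_secondOcc s)

theorem alt_eq_map (num : Int) :
    get_duplicates_from_number_alt num
      = (secondOcc ((PySem.Int.toStr num).toList)).map (fun c => String.mk [c]) := by
  show (PySem.List.sorted
      ((PySem.List.dedup ((PySem.Int.toStr num).toList)).filter
        (fun c => decide (1 < ((PySem.Int.toStr num).toList).count c)))
      (fun c => pySecondIndex ((PySem.Int.toStr num).toList) c) false).map
      (fun c => String.mk [c])
    = (secondOcc ((PySem.Int.toStr num).toList)).map (fun c => String.mk [c])
  rw [sorted_eq_secondOcc]

-- ===== VERDICT (by name: the statement is the Claim_ definition above) =====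
theorem get_duplicates_from_number_spec : Claim_equal_get_duplicates_from_number := by
  intro num _
  unfold Spec_get_duplicates_from_number
  rw [alt_eq_map]
  unfold get_duplicates_from_number
  have h := foldl_inv ((PySem.Int.toStr num).toList) []
  simp only [List.nil_append] at h
  show List.map (fun c => String.mk [c])
      (List.foldl (fun (st : PySem.Set Char × List Char) d =>
          if d ∈ st.1 ∧ d ∉ st.2 then (st.1, st.2 ++ [d]) else (PySem.Set.add st.1 d, st.2))
        (PySem.Set.ofList [], secondOcc []) ((PySem.Int.toStr num).toList)).2
    = List.map (fun c => String.mk [c]) (secondOcc ((PySem.Int.toStr num).toList))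
  rw [h]
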